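-- pv_equiv track=rewrite | github.com/guaardvark/guaardvark | plugins/swarm/service/plan_parser.py | _extract_headings
-- ===== SOURCE A (Python) =====
-- def _extract_headings(content: str, prefix: str) -> list[tuple[str, str]]:
--     """Extract (heading, body) pairs for a given heading prefix."""
--     blocks: list[tuple[str, str]] = []
--     current_heading = None
--     current_lines: list[str] = []
--     prefix_len = len(prefix)
--
--     for line in content.split("\n"):
--         if line.startswith(prefix) and (prefix != "## " or not line.startswith("### ")):
--             if current_heading is not None:
--                 blocks.append((current_heading, "\n".join(current_lines).strip()))
--             current_heading = line[prefix_len:].strip()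
--             current_lines = []
--         elif current_heading is not None:
--             current_lines.append(line)
--
--     # don't forget the last block
--     if current_heading is not None:
--         blocks.append((current_heading, "\n".join(current_lines).strip()))
--
--     return blocks
-- ===== SOURCE B (Python) =====
-- def _extract_headings(content: str, prefix: str) -> list[tuple[str, str]]:
--     """Extract (heading, body) pairs for a given heading prefix.
--
--     Single reverse pass: walking the lines bottom-up, body lines are
--     accumulated until their heading is reached, so no Optional
--     "current heading" state and no final flush are needed; lines before
--     the first heading are simply left over and discarded.
--     """
--     plen = len(prefix)
--     rblocks: list[tuple[str, str]] = []
--     rbody: list[str] = []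
--     for line in reversed(content.split("\n")):
--         if line.startswith(prefix) and (prefix != "## " or not line.startswith("### ")):
--             rblocks.append((line[plen:].strip(), "\n".join(reversed(rbody)).strip()))
--             rbody = []
--         else:
--             rbody.append(line)
--     rblocks.reverse()
--     return rblocks
-- ===== Notes on version B (the rewrite author's own statement) =====
-- stated objective: alternative
-- what changed: Replaces A's forward loop carrying an Optional current-heading plus pending-lines state and a final flush by a single reverse (bottom-up) pass that accumulates body lines until their heading is reached, so no Option state and no post-loop flush are needed.
import Mathlib
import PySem

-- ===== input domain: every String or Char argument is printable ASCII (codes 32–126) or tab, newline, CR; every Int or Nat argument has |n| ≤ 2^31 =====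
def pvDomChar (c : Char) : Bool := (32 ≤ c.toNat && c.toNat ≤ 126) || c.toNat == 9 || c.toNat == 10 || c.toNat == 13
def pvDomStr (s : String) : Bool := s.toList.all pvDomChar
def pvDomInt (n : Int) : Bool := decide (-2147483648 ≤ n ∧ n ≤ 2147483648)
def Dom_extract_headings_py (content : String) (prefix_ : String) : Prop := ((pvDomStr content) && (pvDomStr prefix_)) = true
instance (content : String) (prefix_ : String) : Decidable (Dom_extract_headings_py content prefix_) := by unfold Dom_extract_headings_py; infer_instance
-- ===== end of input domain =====

-- B replaces A's forward loop with Optional-heading state and final flush by a single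
-- reverse pass that accumulates body lines until their heading is reached (objective: alternative).

-- ===== PORT A =====
def extract_headings_py (content : String) (prefix_ : String) : List (String × String) :=
  let prefix_len : Int := PySem.Str.len prefix_
  let st :=
    ((PySem.Str.split? content "\n").getD []).foldl
      (fun (st : List (String × String) × Option String × List String) line =>
        let blocks := st.1
        let current_heading := st.2.1
        let current_lines := st.2.2
        if PySem.Str.startswith line prefix_ &&
           (prefix_ != "## " || !PySem.Str.startswith line "### ") then
          let blocks :=
            match current_heading with
            | some h => blocks ++ [(h, PySem.Str.strip (PySem.Str.join "\n" current_lines))]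
            | none => blocks
          (blocks, some (PySem.Str.strip (PySem.Str.slice line (some prefix_len) none)), [])
        else
          match current_heading with
          | some _ => (blocks, current_heading, current_lines ++ [line])
          | none => (blocks, current_heading, current_lines))
      ([], none, [])
  match st.2.1 with
  | some h => st.1 ++ [(h, PySem.Str.strip (PySem.Str.join "\n" st.2.2))]
  | none => st.1

-- ===== PORT B =====
def extract_headings_py_alt (content : String) (prefix_ : String) : List (String × String) :=
  let plen : Int := PySem.Str.len prefix_
  let st :=
    ((PySem.Str.split? content "\n").getD []).reverse.foldl
      (fun (st : List (String × String) × List String) line =>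
        let rblocks := st.1
        let rbody := st.2
        if PySem.Str.startswith line prefix_ &&
           (prefix_ != "## " || !PySem.Str.startswith line "### ") then
          (rblocks ++ [(PySem.Str.strip (PySem.Str.slice line (some plen) none),
                        PySem.Str.strip (PySem.Str.join "\n" rbody.reverse))], [])
        else
          (rblocks, rbody ++ [line]))
      ([], [])
  st.1.reverse

-- ===== PRECONDITION & SPEC =====
def Spec_extract_headings_py (content : String) (prefix_ : String) (out : List (String × String)) : Prop := out = extract_headings_py_alt content prefix_
instance (content : String) (prefix_ : String) (out : List (String × String)) : Decidable (Spec_extract_headings_py content prefix_ out) := by unfold Spec_extract_headings_py; infer_instance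

-- ===== CLAIM (what is proved, stated in full; the proofs are below) =====
def Claim_equal_extract_headings_py : Prop := ∀ (content : String) (prefix_ : String), Dom_extract_headings_py content prefix_ → Spec_extract_headings_py content prefix_ (extract_headings_py content prefix_)

-- ===== LEMMAS AND PROOFS =====

/-- the heading predicate both programs test -/
def isH (prefix_ line : String) : Bool :=
  PySem.Str.startswith line prefix_ && (prefix_ != "## " || !PySem.Str.startswith line "### ")

def headingOf (prefix_ line : String) : String :=
  PySem.Str.strip (PySem.Str.slice line (some (PySem.Str.len prefix_)) none)

def bodyOf (ls : List String) : String := PySem.Str.strip (PySem.Str.join "\n" ls)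

/-- A's loop body, named -/
def astep (prefix_ : String)
    (st : List (String × String) × Option String × List String) (line : String) :
    List (String × String) × Option String × List String :=
  let blocks := st.1
  let current_heading := st.2.1
  let current_lines := st.2.2
  if isH prefix_ line then
    let blocks :=
      match current_heading with
      | some h => blocks ++ [(h, bodyOf current_lines)]
      | none => blocks
    (blocks, some (headingOf prefix_ line), [])
  else
    match current_heading with
    | some _ => (blocks, current_heading, current_lines ++ [line])
    | none => (blocks, current_heading, current_lines)

/-- A's final flush, named -/
def afin (st : List (String × String) × Option String × List String) :
    List (String × String) :=
  match st.2.1 with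
  | some h => st.1 ++ [(h, bodyOf st.2.2)]
  | none => st.1

/-- B's loop body, named -/
def bstep (prefix_ : String) (st : List (String × String) × List String) (line : String) :
    List (String × String) × List String :=
  if isH prefix_ line then
    (st.1 ++ [(headingOf prefix_ line, bodyOf st.2.reverse)], [])
  else
    (st.1, st.2 ++ [line])

/-- reference recursive characterisation of the result -/
def R (prefix_ : String) : List String → List (String × String)
  | [] => []
  | l :: ls =>
    if isH prefix_ l then
      (headingOf prefix_ l, bodyOf (ls.takeWhile (fun x => !isH prefix_ x))) ::
        R prefix_ (ls.dropWhile (fun x => !isH prefix_ x))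
    else R prefix_ ls
termination_by ls => ls.length
decreasing_by
  · have := List.length_dropWhile_le (fun x => !isH prefix_ x) ls
    simp only [List.length_cons]; omega
  · simp

theorem R_nil (prefix_ : String) : R prefix_ [] = [] := by
  rw [R.eq_def]

theorem R_cons_pos (prefix_ l : String) (ls : List String) (hL : isH prefix_ l = true) :
    R prefix_ (l :: ls) =
      (headingOf prefix_ l, bodyOf (ls.takeWhile (fun x => !isH prefix_ x))) ::
        R prefix_ (ls.dropWhile (fun x => !isH prefix_ x)) := by
  rw [R.eq_def]; simp [hL]

theorem R_cons_neg (prefix_ l : String) (ls : List String) (hL : ¬ isH prefix_ l = true) :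
    R prefix_ (l :: ls) = R prefix_ ls := by
  rw [R.eq_def]; simp [hL]

theorem portA_eq (content prefix_ : String) :
    extract_headings_py content prefix_ =
      afin (((PySem.Str.split? content "\n").getD []).foldl (astep prefix_) ([], none, [])) :=
  rfl

theorem portB_eq (content prefix_ : String) :
    extract_headings_py_alt content prefix_ =
      (((PySem.Str.split? content "\n").getD []).reverse.foldl (bstep prefix_) ([], [])).1.reverse :=
  rfl

theorem A_some (prefix_ : String) (ls : List String) :
    ∀ (blocks : List (String × String)) (hd : String) (cur : List String),
      afin (ls.foldl (astep prefix_) (blocks, some hd, cur)) =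
        blocks ++ (hd, bodyOf (cur ++ ls.takeWhile (fun x => !isH prefix_ x))) ::
          R prefix_ (ls.dropWhile (fun x => !isH prefix_ x)) := by
  induction ls with
  | nil => intro blocks hd cur; simp [afin, R_nil]
  | cons l ls ih =>
    intro blocks hd cur
    by_cases hL : isH prefix_ l
    · have hstep : astep prefix_ (blocks, some hd, cur) l =
          (blocks ++ [(hd, bodyOf cur)], some (headingOf prefix_ l), []) := by
        simp [astep, hL]
      have h1 : List.takeWhile (fun x => !isH prefix_ x) (l :: ls) = [] := by simp [hL]
      have h2 : List.dropWhile (fun x => !isH prefix_ x) (l :: ls) = l :: ls := by simp [hL]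
      rw [List.foldl_cons, hstep, ih, h1, h2, R_cons_pos prefix_ l ls hL]
      simp
    · have hstep : astep prefix_ (blocks, some hd, cur) l =
          (blocks, some hd, cur ++ [l]) := by
        simp [astep, hL]
      have h1 : List.takeWhile (fun x => !isH prefix_ x) (l :: ls) =
          l :: List.takeWhile (fun x => !isH prefix_ x) ls := by simp [hL]
      have h2 : List.dropWhile (fun x => !isH prefix_ x) (l :: ls) =
          List.dropWhile (fun x => !isH prefix_ x) ls := by simp [hL]
      rw [List.foldl_cons, hstep, ih, h1, h2]
      simp

theorem A_none (prefix_ : String) (ls : List String) :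
    ∀ (blocks : List (String × String)) (cur : List String),
      afin (ls.foldl (astep prefix_) (blocks, none, cur)) = blocks ++ R prefix_ ls := by
  induction ls with
  | nil => intro blocks cur; simp [afin, R_nil]
  | cons l ls ih =>
    intro blocks cur
    by_cases hL : isH prefix_ l
    · have hstep : astep prefix_ (blocks, none, cur) l =
          (blocks, some (headingOf prefix_ l), []) := by
        simp [astep, hL]
      rw [List.foldl_cons, hstep, A_some, R_cons_pos prefix_ l ls hL]
      simp
    · have hstep : astep prefix_ (blocks, none, cur) l = (blocks, none, cur) := by
        simp [astep, hL]
      rw [List.foldl_cons, hstep, ih, R_cons_neg prefix_ l ls hL]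

theorem R_dropWhile (prefix_ : String) (ls : List String) :
    R prefix_ (ls.dropWhile (fun x => !isH prefix_ x)) = R prefix_ ls := by
  induction ls with
  | nil => simp
  | cons l ls ih =>
    by_cases hL : isH prefix_ l
    · simp [hL]
    · have h2 : List.dropWhile (fun x => !isH prefix_ x) (l :: ls) =
          List.dropWhile (fun x => !isH prefix_ x) ls := by simp [hL]
      rw [h2, ih, R_cons_neg prefix_ l ls hL]

theorem B_inv (prefix_ : String) (ls : List String) :
    ls.foldr (fun x y => bstep prefix_ y x) ([], []) =
      ((R prefix_ ls).reverse, (ls.takeWhile (fun x => !isH prefix_ x)).reverse) := by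
  induction ls with
  | nil => simp [R_nil]
  | cons l ls ih =>
    rw [List.foldr_cons, ih]
    by_cases hL : isH prefix_ l
    · have hstep : bstep prefix_ ((R prefix_ ls).reverse,
          (ls.takeWhile (fun x => !isH prefix_ x)).reverse) l =
          ((R prefix_ ls).reverse ++
            [(headingOf prefix_ l, bodyOf (ls.takeWhile (fun x => !isH prefix_ x)))], []) := by
        simp [bstep, hL]
      rw [hstep, R_cons_pos prefix_ l ls hL]
      simp [hL, R_dropWhile]
    · have hstep : bstep prefix_ ((R prefix_ ls).reverse,
          (ls.takeWhile (fun x => !isH prefix_ x)).reverse) l =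
          ((R prefix_ ls).reverse,
            (ls.takeWhile (fun x => !isH prefix_ x)).reverse ++ [l]) := by
        simp [bstep, hL]
      rw [hstep, R_cons_neg prefix_ l ls hL]
      simp [hL]

-- ===== VERDICT (by name: the statement is the Claim_ definition above) =====
theorem extract_headings_py_spec : Claim_equal_extract_headings_py := by
  intro content prefix_ _
  unfold Spec_extract_headings_py
  rw [portA_eq, portB_eq, List.foldl_reverse]
  rw [A_none, B_inv]
  simp
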